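-- pv_equiv track=rewrite | github.com/DariaG13/python-assignments | Programowanie/Lista 3.py | sito_Sundarama
-- ===== SOURCE A (Python) =====
-- def sito_Sundarama(N):
--     k=(N-2)//2
--     kandydaci=list(range(1,k+1))
--     liczby=[]
--     if 2<N:
--         liczby.append(2)
--     for i in range(1, k+1):
--         for j in range(1,k+1):
--             suma=i+j+2*i*j
--             if suma <=k:
--                 kandydaci[suma-1]=None
--     for k in kandydaci:
--         if k is not None:
--             liczby.append(2*k+1)
--     return liczby
-- ===== SOURCE B (Python) =====
-- def sito_Sundarama(N):
--     # Sundaram sieve with tight loop bounds: i only while 2*i + 2*i*i <= k,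
--     # and for each i the marked values stepped directly (start 2*i+2*i*i, step 2*i+1),
--     # collected in a set instead of overwriting a candidate list.
--     k = (N - 2) // 2
--     composite = set()
--     i = 1
--     while i + i + 2 * i * i <= k:
--         v = i + i + 2 * i * i
--         step = 2 * i + 1
--         while v <= k:
--             composite.add(v)
--             v += step
--         i += 1
--     liczby = [2] if 2 < N else []
--     for m in range(1, k + 1):
--         if m not in composite:
--             liczby.append(2 * m + 1)
--     return liczby
-- ===== Notes on version B (the rewrite author's own statement) =====
-- stated objective: faster
-- what changed: Replaces A's O(k^2) scan over all (i,j) pairs with a set-based Sundaram sieve whose outer loop stops at 2i+2i^2 <= k and whose inner loop steps directly through the marked values (start 2i+2i^2, step 2i+1) up to k, instead of testing every pair and overwriting a candidate list.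
import Mathlib
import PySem

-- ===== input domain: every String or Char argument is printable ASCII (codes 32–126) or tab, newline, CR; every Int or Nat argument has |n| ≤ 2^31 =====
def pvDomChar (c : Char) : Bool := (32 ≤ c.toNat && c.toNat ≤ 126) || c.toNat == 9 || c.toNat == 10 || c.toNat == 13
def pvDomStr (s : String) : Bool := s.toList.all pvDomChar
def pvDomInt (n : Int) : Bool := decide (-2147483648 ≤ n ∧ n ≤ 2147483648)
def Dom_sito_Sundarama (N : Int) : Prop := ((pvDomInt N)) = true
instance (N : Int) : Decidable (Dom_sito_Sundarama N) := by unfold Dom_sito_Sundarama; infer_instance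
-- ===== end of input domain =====

-- B replaces A's O(k^2) all-pairs marking with tight Sundaram loop bounds (i while 2i+2i² ≤ k,
-- marked values stepped by 2i+1 up to k) collected in a set; objective: faster (asymptotic).

-- ===== PORT A =====
-- kandydaci holds ints later overwritten by None, so it is List (Option Int) (initially all `some`);
-- the assignment kandydaci[suma-1]=None is PySem.List.pySetD (index suma-1 ≥ 3 is always in range under the guard suma ≤ k).
def sito_Sundarama (N : Int) : List Int :=
  let k := PySem.Int.floordiv (N - 2) 2
  let kandydaci : List (Option Int) := (PySem.List.pyRange 1 (k+1) 1).map some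
  let liczby : List Int := if 2 < N then [2] else []
  let kandydaci := (PySem.List.pyRange 1 (k+1) 1).foldl (fun kan i =>
      (PySem.List.pyRange 1 (k+1) 1).foldl (fun kan j =>
        let suma := i + j + 2*i*j
        if suma ≤ k then PySem.List.pySetD kan (suma - 1) none else kan) kan) kandydaci
  kandydaci.foldl (fun l o => match o with | some x => l ++ [2*x+1] | none => l) liczby

-- ===== PORT B =====
-- inner `while v <= k: composite.add(v); v += step` of Source B (step = 2*i+1; hi proves termination)
def pvMarkFrom (k i v : Int) (s : PySem.Set Int) (hi : 1 ≤ i) : PySem.Set Int :=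
  if _h : v ≤ k then pvMarkFrom k i (v + (2*i+1)) (PySem.Set.add s v) hi else s
termination_by (k + 1 - v).toNat
decreasing_by omega

-- outer `while i + i + 2*i*i <= k` loop of Source B
def pvOuter (k i : Int) (s : PySem.Set Int) (hi : 1 ≤ i) : PySem.Set Int :=
  if _h : i + i + 2*i*i ≤ k then
    pvOuter k (i+1) (pvMarkFrom k i (i + i + 2*i*i) s hi) (by omega)
  else s
termination_by (k + 2 - i).toNat
decreasing_by
  have h2 : 0 ≤ 2*i*i := by positivity
  omega

def sito_Sundarama_alt (N : Int) : List Int :=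
  let k := PySem.Int.floordiv (N - 2) 2
  let composite : PySem.Set Int := pvOuter k 1 PySem.Set.empty (le_refl 1)
  let liczby : List Int := if 2 < N then [2] else []
  (PySem.List.pyRange 1 (k+1) 1).foldl
    (fun l m => if !(PySem.Set.contains composite m) then l ++ [2*m+1] else l) liczby

-- ===== PRECONDITION & SPEC =====
def Spec_sito_Sundarama (N : Int) (out : List Int) : Prop := out = sito_Sundarama_alt N
instance (N : Int) (out : List Int) : Decidable (Spec_sito_Sundarama N out) := by unfold Spec_sito_Sundarama; infer_instance

-- ===== CLAIM (what is proved, stated in full; the proofs are below) =====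
def Claim_equal_sito_Sundarama : Prop := ∀ (N : Int), Dom_sito_Sundarama N → Spec_sito_Sundarama N (sito_Sundarama N)

-- ===== LEMMAS AND PROOFS =====

-- "m is struck out" in Sundaram's sieve, phrased exactly as A's double loop sees it
def pvMarked (k m : Int) : Bool :=
  (PySem.List.pyRange 1 (k+1) 1).any fun i =>
    (PySem.List.pyRange 1 (k+1) 1).any fun j => decide (i + j + 2*i*j = m)

-- the step of A's inner loop, named for the lemmas
lemma pvMarked_iff (k m : Int) :
    pvMarked k m = true ↔ ∃ i, (1 ≤ i ∧ i ≤ k) ∧ ∃ j, (1 ≤ j ∧ j ≤ k) ∧ i + j + 2*i*j = m := by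
  simp [pvMarked, List.any_eq_true, PySem.List.mem_pyRange_one]

def pvStepA (k : Int) (kan : List (Option Int)) (p : Int × Int) : List (Option Int) :=
  if p.1 + p.2 + 2*p.1*p.2 ≤ k then PySem.List.pySetD kan (p.1 + p.2 + 2*p.1*p.2 - 1) none else kan

lemma pv_double_foldl (k : Int) (xs ys : List Int) (init : List (Option Int)) :
    xs.foldl (fun kan i => ys.foldl (fun kan j =>
        let suma := i + j + 2*i*j
        if suma ≤ k then PySem.List.pySetD kan (suma - 1) none else kan) kan) init
      = (xs.flatMap (fun i => ys.map (fun j => (i, j)))).foldl (pvStepA k) init := by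
  induction xs generalizing init with
  | nil => simp
  | cons x xs ih =>
    simp only [List.foldl_cons, List.flatMap_cons, List.foldl_append, List.foldl_map, ih, pvStepA]

lemma pv_len_foldl_stepA (k : Int) (ps : List (Int × Int)) (l : List (Option Int)) :
    (ps.foldl (pvStepA k) l).length = l.length := by
  induction ps generalizing l with
  | nil => rfl
  | cons p ps ih =>
    rw [List.foldl_cons, ih]
    unfold pvStepA
    split
    · simp [PySem.List.length_pySetD]
    · rfl

lemma pv_foldl_stepA_getElem (k : Int) (ps : List (Int × Int)) (l : List (Option Int))
    (hp : ∀ p ∈ ps, 1 ≤ p.1 ∧ 1 ≤ p.2) (hl : l.length = k.toNat) (t : Nat) (ht : t < l.length) :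
    (ps.foldl (pvStepA k) l)[t]? =
      if ∃ p ∈ ps, p.1 + p.2 + 2*p.1*p.2 ≤ k ∧ p.1 + p.2 + 2*p.1*p.2 - 1 = (t : Int)
      then some none else l[t]? := by
  induction ps generalizing l with
  | nil => simp
  | cons p ps ih =>
    have hp1 := (hp p (by simp)).1
    have hp2 := (hp p (by simp)).2
    have hmul : 1 ≤ p.1 * p.2 := by nlinarith
    have hlen : (pvStepA k l p).length = l.length := by
      unfold pvStepA; split
      · simp [PySem.List.length_pySetD]
      · rfl
    rw [List.foldl_cons, ih _ (fun q hq => hp q (by simp [hq])) (hlen.trans hl) (hlen ▸ ht)]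
    have hstep : (pvStepA k l p)[t]? =
        if p.1 + p.2 + 2*p.1*p.2 ≤ k ∧ p.1 + p.2 + 2*p.1*p.2 - 1 = (t : Int)
        then some none else l[t]? := by
      unfold pvStepA
      split
      · rename_i hle
        rw [PySem.List.pySetD_of_nonneg l (none : Option Int) (by nlinarith)]
        rw [List.getElem?_set]
        have h2 : 2*p.1*p.2 = 2*(p.1*p.2) := by ring
        by_cases heq : p.1 + p.2 + 2*p.1*p.2 - 1 = (t : Int)
        · have h1 : (p.1 + p.2 + 2*p.1*p.2 - 1).toNat = t := by omega
          rw [if_pos h1, if_pos (h1 ▸ (h1.symm ▸ ht)), if_pos ⟨hle, heq⟩]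
        · have h1 : (p.1 + p.2 + 2*p.1*p.2 - 1).toNat ≠ t := by omega
          rw [if_neg h1, if_neg (fun hc => heq hc.2)]
      · rename_i hle
        simp [hle]
    rw [hstep]
    have hcons : (∃ q ∈ p :: ps, q.1 + q.2 + 2*q.1*q.2 ≤ k ∧ q.1 + q.2 + 2*q.1*q.2 - 1 = (t : Int))
        ↔ (p.1 + p.2 + 2*p.1*p.2 ≤ k ∧ p.1 + p.2 + 2*p.1*p.2 - 1 = (t : Int)) ∨
          (∃ q ∈ ps, q.1 + q.2 + 2*q.1*q.2 ≤ k ∧ q.1 + q.2 + 2*q.1*q.2 - 1 = (t : Int)) :=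
      List.exists_mem_cons_iff _ _ _
    by_cases hA : (∃ q ∈ ps, q.1 + q.2 + 2*q.1*q.2 ≤ k ∧ q.1 + q.2 + 2*q.1*q.2 - 1 = (t : Int))
    · rw [if_pos hA, if_pos (hcons.mpr (Or.inr hA))]
    · rw [if_neg hA]
      by_cases hB : (p.1 + p.2 + 2*p.1*p.2 ≤ k ∧ p.1 + p.2 + 2*p.1*p.2 - 1 = (t : Int))
      · rw [if_pos hB, if_pos (hcons.mpr (Or.inl hB))]
      · rw [if_neg hB, if_neg (fun hc => (hcons.mp hc).elim hB hA)]

lemma pv_candidates_eq (k : Int) :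
    ((PySem.List.pyRange 1 (k+1) 1).flatMap (fun i =>
        (PySem.List.pyRange 1 (k+1) 1).map (fun j => (i, j)))).foldl (pvStepA k)
      ((PySem.List.pyRange 1 (k+1) 1).map some)
    = (PySem.List.pyRange 1 (k+1) 1).map
        (fun m => if pvMarked k m then none else some m) := by
  have hlen0 : ((PySem.List.pyRange 1 (k+1) 1).map (some : Int → Option Int)).length = k.toNat := by
    simp [PySem.List.length_pyRange_one]
  apply List.ext_getElem?
  intro t
  have hlenL := pv_len_foldl_stepA k ((PySem.List.pyRange 1 (k+1) 1).flatMap (fun i =>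
        (PySem.List.pyRange 1 (k+1) 1).map (fun j => (i, j)))) ((PySem.List.pyRange 1 (k+1) 1).map some)
  by_cases ht : t < k.toNat
  · rw [pv_foldl_stepA_getElem k _ _ ?hp hlen0 t (by omega)]
    case hp =>
      intro p hp
      simp only [List.mem_flatMap, List.mem_map] at hp
      obtain ⟨i, hi, j, hj, rfl⟩ := hp
      rw [PySem.List.mem_pyRange_one] at hi hj
      exact ⟨hi.1, hj.1⟩
    have hR : ((PySem.List.pyRange 1 (k+1) 1).map
        (fun m => if pvMarked k m then none else some m))[t]? =
        some (if pvMarked k (1 + (t:Int)) then none else some (1 + (t:Int))) := by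
      rw [List.getElem?_map, PySem.List.getElem?_pyRange_one]
      simp only [if_pos (by omega : t < (k + 1 - 1).toNat), Option.map_some]
    have hL0 : ((PySem.List.pyRange 1 (k+1) 1).map (some : Int → Option Int))[t]? =
        some (some (1 + (t:Int))) := by
      rw [List.getElem?_map, PySem.List.getElem?_pyRange_one]
      simp only [if_pos (by omega : t < (k + 1 - 1).toNat), Option.map_some]
    rw [hR, hL0]
    have hcond : (∃ p ∈ (PySem.List.pyRange 1 (k+1) 1).flatMap (fun i =>
          (PySem.List.pyRange 1 (k+1) 1).map (fun j => (i, j))),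
          p.1 + p.2 + 2*p.1*p.2 ≤ k ∧ p.1 + p.2 + 2*p.1*p.2 - 1 = (t : Int))
        ↔ pvMarked k (1 + (t:Int)) = true := by
      simp only [List.mem_flatMap, List.mem_map, pvMarked, List.any_eq_true, decide_eq_true_eq,
        PySem.List.mem_pyRange_one]
      constructor
      · rintro ⟨p, ⟨i, hi, j, hj, rfl⟩, hc1, hc2⟩
        dsimp only at hc1 hc2
        exact ⟨i, hi, j, hj, by omega⟩
      · rintro ⟨i, hi, j, hj, hsum⟩
        refine ⟨(i, j), ⟨i, hi, j, hj, rfl⟩, ?_, ?_⟩ <;> dsimp only <;> omega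
    by_cases hm : pvMarked k (1 + (t:Int)) = true
    · rw [if_pos (hcond.mpr hm), hm]; rfl
    · rw [if_neg (fun hc => hm (hcond.mp hc)), eq_false_of_ne_true hm]; rfl
  · rw [List.getElem?_eq_none, List.getElem?_eq_none]
    · simp [PySem.List.length_pyRange_one]; omega
    · omega

lemma pv_foldl_opt (xs : List (Option Int)) (init : List Int) :
    xs.foldl (fun l o => match o with | some x => l ++ [2*x+1] | none => l) init
      = init ++ xs.filterMap (fun o => o.map (fun x => 2*x+1)) := by
  induction xs generalizing init with
  | nil => simp
  | cons o xs ih =>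
    cases o <;> simp [ih]

lemma pv_markFrom_mem (k i v : Int) (s : PySem.Set Int) (hi : 1 ≤ i) (x : Int) :
    x ∈ pvMarkFrom k i v s hi ↔ x ∈ s ∨ (v ≤ x ∧ x ≤ k ∧ (2*i+1) ∣ (x - v)) := by
  fun_induction pvMarkFrom k i v s hi with
  | case1 v s h ih =>
    rw [ih, PySem.Set.mem_add]
    constructor
    · rintro (((hs | rfl) | ⟨h1, h2, c, hc⟩))
      · exact Or.inl hs
      · exact Or.inr ⟨le_refl _, h, by simp⟩
      · refine Or.inr ⟨by nlinarith, h2, ⟨c + 1, by ring_nf; linarith⟩⟩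
    · rintro (hs | ⟨h1, h2, c, hc⟩)
      · exact Or.inl (Or.inl hs)
      · by_cases hxv : x = v
        · exact Or.inl (Or.inr hxv)
        · have hstep : (0:Int) < 2*i+1 := by omega
          have hc1 : 1 ≤ c := by
            by_contra h'
            have hc0 : c ≤ 0 := by omega
            have hle0 : (2*i+1)*c ≤ 0 := mul_nonpos_of_nonneg_of_nonpos hstep.le hc0
            omega
          refine Or.inr ⟨by nlinarith, h2, ⟨c - 1, by ring_nf; ring_nf at hc; omega⟩⟩
  | case2 v s h => simp; intro h1 h2; omega

lemma pv_outer_mem (k : Int) (i : Int) (s : PySem.Set Int) (hi : 1 ≤ i) (x : Int) :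
    x ∈ pvOuter k i s hi ↔ x ∈ s ∨
      ∃ i', i ≤ i' ∧ i' + i' + 2*i'*i' ≤ k ∧ i' + i' + 2*i'*i' ≤ x ∧ x ≤ k ∧
        (2*i'+1) ∣ (x - (i' + i' + 2*i'*i')) := by
  fun_induction pvOuter k i s hi with
  | case1 i s hi h ih =>
    rw [ih, pv_markFrom_mem]
    constructor
    · rintro ((hs | ⟨h1, h2, hd⟩) | ⟨i', hge, hc⟩)
      · exact Or.inl hs
      · exact Or.inr ⟨i, le_refl i, h, h1, h2, hd⟩
      · exact Or.inr ⟨i', by omega, hc⟩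
    · rintro (hs | ⟨i', hge, hk, hx, hxk, hd⟩)
      · exact Or.inl (Or.inl hs)
      · by_cases hii : i' = i
        · subst hii; exact Or.inl (Or.inr ⟨hx, hxk, hd⟩)
        · exact Or.inr ⟨i', by omega, hk, hx, hxk, hd⟩
  | case2 i s hi h =>
    simp only [iff_self_or]
    rintro ⟨i', hge, hk, -⟩
    exact absurd hk (by nlinarith)

lemma pv_bridge (k m : Int) (h1 : 1 ≤ m) (h2 : m ≤ k) :
    (∃ i', 1 ≤ i' ∧ i' + i' + 2*i'*i' ≤ k ∧ i' + i' + 2*i'*i' ≤ m ∧ m ≤ k ∧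
        (2*i'+1) ∣ (m - (i' + i' + 2*i'*i')))
      ↔ pvMarked k m = true := by
  rw [pvMarked_iff]
  constructor
  · rintro ⟨i', hi1, hk, hm, hmk, c, hc⟩
    have hc0 : 0 ≤ c := by
      by_contra h'
      have hc0 : c ≤ -1 := by omega
      have : (2*i'+1)*c ≤ -(2*i'+1) := by nlinarith
      omega
    refine ⟨i', ⟨hi1, by nlinarith⟩, i' + c, ⟨by omega, by nlinarith⟩, by ring_nf; ring_nf at hc; omega⟩
  · rintro ⟨i, ⟨hi1, hik⟩, j, ⟨hj1, hjk⟩, hsum⟩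
    rcases le_total i j with hij | hij
    · exact ⟨i, hi1, by nlinarith, by nlinarith, h2, ⟨j - i, by linear_combination -hsum⟩⟩
    · exact ⟨j, hj1, by nlinarith, by nlinarith, h2, ⟨i - j, by linear_combination -hsum⟩⟩

lemma pv_filter_map_eq_filterMap (l : List Int) (p : Int → Bool) (f : Int → Int) :
    (l.filter p).map f = l.filterMap (fun m => if p m then some (f m) else none) := by
  induction l with
  | nil => rfl
  | cons x l ih => by_cases h : p x <;> simp [h, ih]

-- ===== VERDICT (by name: the statement is the Claim_ definition above) =====
theorem sito_Sundarama_spec : Claim_equal_sito_Sundarama := by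
  intro N _
  unfold Spec_sito_Sundarama sito_Sundarama sito_Sundarama_alt
  simp only []
  set k := PySem.Int.floordiv (N - 2) 2 with hk
  rw [pv_double_foldl, pv_candidates_eq, pv_foldl_opt, PySem.List.foldl_append_if]
  congr 1
  rw [List.filterMap_map, pv_filter_map_eq_filterMap]
  apply List.filterMap_congr
  intro m hm
  rw [PySem.List.mem_pyRange_one] at hm
  have hmem : m ∈ pvOuter k 1 PySem.Set.empty (le_refl 1) ↔ pvMarked k m = true := by
    rw [pv_outer_mem, ← pv_bridge k m hm.1 (by omega)]
    simp [PySem.Set.empty]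
  simp only [Function.comp_apply, PySem.Set.contains_eq_listContains,
    Bool.not_eq_eq_eq_not, Bool.not_true, List.contains_eq_mem, decide_eq_false_iff_not]
  by_cases hmark : pvMarked k m = true
  · rw [if_pos hmark, if_neg (fun h => h (hmem.mpr hmark))]
    rfl
  · rw [if_neg hmark, if_pos (fun h => hmark (hmem.mp h))]
    rfl
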